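-- pv_equiv track=rewrite | github.com/keenua/advent2023 | day3/part1.py | find_numbers_in_the_line
-- ===== SOURCE A (Python) =====
-- from typing import List, Tuple
--
-- def find_numbers_in_the_line(line: str) -> List[Tuple[int, int]]:
--     """
--     Returns list of tuples (start_index, end_index)
--     """
--     numbers = []
--     i = 0
--     while i < len(line):
--         if line[i].isdigit():
--             start_index = i
--             i += 1
--             while i < len(line) and line[i].isdigit():
--                 i += 1
--
--             numbers.append((start_index, i - 1))
--         else:
--             i += 1
--     return numbers
-- ===== SOURCE B (Python) =====
-- from typing import List, Tuple
--
-- def find_numbers_in_the_line(line: str) -> List[Tuple[int, int]]: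
--     """
--     Returns list of tuples (start_index, end_index)
--     """
--     digit_positions = [i for i, c in enumerate(line) if c.isdigit()]
--     digit_set = set(digit_positions)
--     starts = [i for i in digit_positions if i - 1 not in digit_set]
--     ends = [i for i in digit_positions if i + 1 not in digit_set]
--     return list(zip(starts, ends))
-- ===== Notes on version B (the rewrite author's own statement) =====
-- stated objective: alternative
-- what changed: Replaces A's manual nested-while index state machine by staged passes over an index structure: collect all digit positions, build a set of them, derive run starts (positions whose predecessor is not a digit position) and run ends (successor not a digit position) as two filters, and zip starts with ends.
import Mathlib
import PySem

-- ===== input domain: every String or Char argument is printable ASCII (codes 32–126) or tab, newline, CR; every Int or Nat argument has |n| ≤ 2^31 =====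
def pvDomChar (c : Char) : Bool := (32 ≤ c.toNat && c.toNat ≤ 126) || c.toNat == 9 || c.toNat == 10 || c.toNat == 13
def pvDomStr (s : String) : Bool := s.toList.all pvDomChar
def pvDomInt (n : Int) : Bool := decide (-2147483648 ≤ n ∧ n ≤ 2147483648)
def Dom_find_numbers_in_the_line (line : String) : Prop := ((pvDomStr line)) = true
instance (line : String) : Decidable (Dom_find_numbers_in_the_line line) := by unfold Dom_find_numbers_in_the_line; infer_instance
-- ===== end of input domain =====

-- B replaces A's manual nested-while index state machine by staged passes over an index
-- structure: collect the digit positions, build a set of them, filter out run starts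
-- (predecessor not a digit position) and run ends (successor not one), and zip them.

-- ===== PORT A =====
-- inner while loop: 'while i < len(line) and line[i].isdigit(): i += 1'; returns the final i
def pvAInner (cs : List Char) (i : Nat) : Nat :=
  if h : i < cs.length then
    if PySem.Chars.isdigit cs[i] then pvAInner cs (i + 1) else i
  else i
termination_by cs.length - i

-- the inner while never moves i backwards (cited by the outer loop's termination proof)
theorem pvAInner_ge (cs : List Char) (i : Nat) : i ≤ pvAInner cs i := by
  fun_induction pvAInner cs i <;> omega

-- outer while loop over index i with accumulator 'numbers'
def pvAOuter (cs : List Char) (i : Nat) (acc : List (Int × Int)) : List (Int × Int) :=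
  if h : i < cs.length then
    if PySem.Chars.isdigit cs[i] then
      let j := pvAInner cs (i + 1)
      pvAOuter cs j (acc ++ [((i : Int), (j : Int) - 1)])
    else pvAOuter cs (i + 1) acc
  else acc
termination_by cs.length - i
decreasing_by
  · have := pvAInner_ge cs (i + 1); omega
  · omega

def find_numbers_in_the_line (line : String) : List (Int × Int) :=
  pvAOuter line.toList 0 []

-- ===== PORT B =====
def find_numbers_in_the_line_alt (line : String) : List (Int × Int) :=
  -- digit_positions = [i for i, c in enumerate(line) if c.isdigit()]
  let digit_positions : List Int :=
    ((PySem.List.enumerate line.toList 0).filter (fun p => PySem.Chars.isdigit p.2)).map (·.1)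
  -- digit_set = set(digit_positions)
  let digit_set : PySem.Set Int := PySem.Set.ofList digit_positions
  -- starts = [i for i in digit_positions if i - 1 not in digit_set]
  let starts := digit_positions.filter (fun i => !(PySem.Set.contains digit_set (i - 1)))
  -- ends = [i for i in digit_positions if i + 1 not in digit_set]
  let ends := digit_positions.filter (fun i => !(PySem.Set.contains digit_set (i + 1)))
  -- list(zip(starts, ends))
  starts.zip ends

-- ===== PRECONDITION & SPEC =====
def Spec_find_numbers_in_the_line (line : String) (out : List (Int × Int)) : Prop := out = find_numbers_in_the_line_alt line
instance (line : String) (out : List (Int × Int)) : Decidable (Spec_find_numbers_in_the_line line out) := by unfold Spec_find_numbers_in_the_line; infer_instance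

-- ===== CLAIM (what is proved, stated in full; the proofs are below) =====
def Claim_equal_find_numbers_in_the_line : Prop := ∀ (line : String), Dom_find_numbers_in_the_line line → Spec_find_numbers_in_the_line line (find_numbers_in_the_line line)

-- ===== LEMMAS AND PROOFS =====

-- common characterisation: digit runs of l, indices starting at n
def pvRuns (n : Int) : List Char → List (Int × Int)
  | [] => []
  | c :: rest =>
    if PySem.Chars.isdigit c then
      (n, n + (rest.takeWhile PySem.Chars.isdigit).length)
        :: pvRuns (n + 1 + (rest.takeWhile PySem.Chars.isdigit).length) (rest.dropWhile PySem.Chars.isdigit)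
    else pvRuns (n + 1) rest
termination_by l => l.length
decreasing_by
  · have := List.length_dropWhile_le PySem.Chars.isdigit rest
    simp only [List.length_cons]; omega
  · simp only [List.length_cons]; omega

-- ---- A side ----

theorem pvAInner_eq (cs : List Char) (i : Nat) :
    pvAInner cs i = i + ((cs.drop i).takeWhile PySem.Chars.isdigit).length ∧
    cs.drop (pvAInner cs i) = (cs.drop i).dropWhile PySem.Chars.isdigit := by
  fun_induction pvAInner cs i with
  | case1 i h hd ih =>
    obtain ⟨ih1, ih2⟩ := ih
    have hdrop : cs.drop i = cs[i] :: cs.drop (i + 1) := (List.getElem_cons_drop h).symm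
    rw [hdrop]
    simp only [List.takeWhile_cons, List.dropWhile_cons, hd, if_true, List.length_cons]
    exact ⟨by rw [ih1]; omega, ih2⟩
  | case2 i h hd =>
    have hdrop : cs.drop i = cs[i] :: cs.drop (i + 1) := (List.getElem_cons_drop h).symm
    rw [hdrop]
    constructor
    · rw [List.takeWhile_cons_of_neg (by simp [hd])]; simp
    · exact (List.dropWhile_cons_of_neg (by simp [hd])).symm
  | case3 i h =>
    have h0 : cs.drop i = [] := List.drop_eq_nil_of_le (by omega)
    simp [h0]

theorem pvAOuter_eq (cs : List Char) (i : Nat) (acc : List (Int × Int)) :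
    pvAOuter cs i acc = acc ++ pvRuns (i : Int) (cs.drop i) := by
  fun_induction pvAOuter cs i acc with
  | case1 i acc h hd j ih =>
    have hdrop : cs.drop i = cs[i] :: cs.drop (i + 1) := (List.getElem_cons_drop h).symm
    obtain ⟨hj, hdj⟩ := pvAInner_eq cs (i + 1)
    rw [ih, hdrop]
    simp only [pvRuns, hd, if_true]
    have hji : j = i + 1 + ((cs.drop (i+1)).takeWhile PySem.Chars.isdigit).length := hj
    rw [hj] at hdj
    rw [hji, hdj]
    push_cast
    simp only [List.append_assoc, List.singleton_append]
    congr 3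
    omega
  | case2 i acc h hd ih =>
    have hdrop : cs.drop i = cs[i] :: cs.drop (i + 1) := (List.getElem_cons_drop h).symm
    rw [ih, hdrop]
    simp only [pvRuns, hd, if_false, Bool.false_eq_true]
    push_cast
    rfl
  | case3 i acc h =>
    have h0 : cs.drop i = [] := List.drop_eq_nil_of_le (by omega)
    simp [h0, pvRuns]

-- ---- B side ----

-- the digit-position list of cs, indices starting at n
def pvDP (n : Int) (cs : List Char) : List Int :=
  ((PySem.List.enumerate cs n).filter (fun p => PySem.Chars.isdigit p.2)).map (·.1)

theorem pvDP_nil (n : Int) : pvDP n [] = [] := rfl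

theorem pvDP_cons (n : Int) (c : Char) (rest : List Char) :
    pvDP n (c :: rest) =
      if PySem.Chars.isdigit c then n :: pvDP (n + 1) rest else pvDP (n + 1) rest := by
  unfold pvDP
  rw [PySem.List.enumerate_cons, List.filter_cons]
  by_cases h : PySem.Chars.isdigit c <;> simp [h]

theorem pvDP_append (n : Int) (xs ys : List Char) :
    pvDP n (xs ++ ys) = pvDP n xs ++ pvDP (n + xs.length) ys := by
  unfold pvDP
  rw [PySem.List.enumerate_append, List.filter_append, List.map_append]

theorem pvDP_lb (n : Int) (cs : List Char) : ∀ i ∈ pvDP n cs, n ≤ i := by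
  induction cs generalizing n with
  | nil => simp [pvDP_nil]
  | cons c rest ih =>
    intro i hi
    rw [pvDP_cons] at hi
    have h' : ∀ j ∈ pvDP (n + 1) rest, n ≤ j := fun j hj => by have := ih (n+1) j hj; omega
    by_cases h : PySem.Chars.isdigit c
    · simp only [h, if_true, List.mem_cons] at hi
      rcases hi with rfl | hi
      · omega
      · exact h' i hi
    · simp only [h, if_false, Bool.false_eq_true] at hi
      exact h' i hi

-- an integer interval [n, n+k): the shape of one digit run's positions
def pvIota (n : Int) : Nat → List Int
  | 0 => []
  | k + 1 => n :: pvIota (n + 1) k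

theorem pvIota_mem (n : Int) (k : Nat) (x : Int) : x ∈ pvIota n k ↔ n ≤ x ∧ x < n + k := by
  induction k generalizing n with
  | zero => simp only [pvIota, List.not_mem_nil, false_iff]; omega
  | succ k ih =>
    simp only [pvIota, List.mem_cons, ih]
    push_cast
    omega

theorem pvIota_snoc (n : Int) (k : Nat) : pvIota n (k + 1) = pvIota n k ++ [n + k] := by
  induction k generalizing n with
  | zero => simp [pvIota]
  | succ k ih =>
    show n :: pvIota (n + 1) (k + 1) = (n :: pvIota (n + 1) k) ++ [n + (k + 1 : Nat)]
    rw [ih]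
    simp only [List.cons_append, List.cons.injEq, true_and, List.append_cancel_left_eq,
      List.cons.injEq, and_true]
    push_cast
    ring

-- an all-digit list contributes the full index interval
theorem pvDP_all_digit (n : Int) (l : List Char) (h : ∀ c ∈ l, PySem.Chars.isdigit c) :
    pvDP n l = pvIota n l.length := by
  induction l generalizing n with
  | nil => simp [pvDP_nil, pvIota]
  | cons c rest ih =>
    rw [pvDP_cons]
    simp only [h c (by simp), if_true, List.length_cons, pvIota]
    rw [ih (n + 1) (fun c hc => h c (by simp [hc]))]

-- digit positions of a maximal non-digit-headed suffix start strictly after m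
theorem pvDP_dropWhile_lb (m : Int) (l : List Char) :
    ∀ i ∈ pvDP m (l.dropWhile PySem.Chars.isdigit), m + 1 ≤ i := by
  induction l generalizing m with
  | nil => simp [pvDP_nil]
  | cons c rest ih =>
    by_cases h : PySem.Chars.isdigit c
    · rw [List.dropWhile_cons_of_pos h]
      exact ih m
    · rw [List.dropWhile_cons_of_neg h]
      intro i hi
      rw [pvDP_cons] at hi
      simp only [h, if_false, Bool.false_eq_true] at hi
      exact pvDP_lb (m + 1) rest i hi

-- starts/ends filtering over the digit-position list
def pvStarts (dp : List Int) : List Int := dp.filter (fun i => !(dp.contains (i - 1)))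
def pvEnds (dp : List Int) : List Int := dp.filter (fun i => !(dp.contains (i + 1)))

-- main B lemma: zipping starts with ends yields exactly the digit runs
theorem pvZip_eq_runs (cs : List Char) (n : Int) :
    (pvStarts (pvDP n cs)).zip (pvEnds (pvDP n cs)) = pvRuns n cs := by
  induction hL : cs.length using Nat.strong_induction_on generalizing cs n with
  | _ len ih =>
  cases cs with
  | nil => simp [pvDP_nil, pvStarts, pvEnds, pvRuns]
  | cons c rest =>
    by_cases h : PySem.Chars.isdigit c
    · -- digit run: c :: takeWhile ++ dropWhile
      set t := rest.takeWhile PySem.Chars.isdigit with ht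
      set r := rest.dropWhile PySem.Chars.isdigit with hr
      have hct : ∀ d ∈ c :: t, PySem.Chars.isdigit d := by
        intro d hd
        rcases List.mem_cons.1 hd with rfl | hd
        · exact h
        · exact List.mem_takeWhile_imp hd
      have hsplit : c :: rest = (c :: t) ++ r := by
        simp [ht, hr]
      set run := pvIota n (t.length + 1) with hrundef
      set tail := pvDP (n + 1 + t.length) r with htaildef
      have hdp : pvDP n (c :: rest) = run ++ tail := by
        rw [hsplit, pvDP_append, pvDP_all_digit n (c :: t) hct]
        simp only [List.length_cons, hrundef, htaildef]
        congr 2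
        push_cast
        ring
      have hrunmem : ∀ i : Int, i ∈ run ↔ (n ≤ i ∧ i ≤ n + t.length) := by
        intro i
        rw [hrundef, pvIota_mem]
        push_cast
        omega
      have htailmem : ∀ i ∈ tail, n + 2 + t.length ≤ i := by
        intro i hi
        have := pvDP_dropWhile_lb (n + 1 + t.length) rest i (by rwa [← hr, ← htaildef])
        omega
      have hmemiff : ∀ x : Int, (run ++ tail).contains x = (run.contains x || tail.contains x) := by
        intro x; simp
      have hrunc : ∀ x : Int, run.contains x = true ↔ (n ≤ x ∧ x ≤ n + t.length) := by
        intro x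
        rw [List.contains_iff_mem, hrunmem]
      have htailc : ∀ x : Int, tail.contains x = true → n + 2 + t.length ≤ x := by
        intro x hx
        exact htailmem x (List.contains_iff_mem.1 hx)
      -- starts of the whole list
      have hstarts : pvStarts (pvDP n (c :: rest)) = n :: pvStarts tail := by
        unfold pvStarts
        rw [hdp, List.filter_append]
        have h1 : List.filter (fun i => !(run ++ tail).contains (i - 1)) run = [n] := by
          have hp : ∀ x ∈ run, (!(run ++ tail).contains (x - 1)) = decide (x = n) := by
            intro x hx
            obtain ⟨hx1, hx2⟩ := (hrunmem x).1 hx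
            by_cases hxe : x = n
            · simp only [hxe, decide_true, Bool.not_eq_true', List.contains_eq_mem,
                List.mem_append, decide_eq_false_iff_not]
              rintro (hc | hc)
              · have := (hrunmem _).1 hc; omega
              · have := htailmem _ hc; omega
            · have hin : (run ++ tail).contains (x - 1) = true := by
                simp only [hmemiff, Bool.or_eq_true]
                left; rw [hrunc]; omega
              rw [hin]; simp [hxe]
          rw [List.filter_congr hp]
          have hnil : List.filter (fun x => decide (x = n)) (pvIota (n + 1) t.length) = [] := by
            apply List.filter_eq_nil_iff.2
            intro a ha
            rw [pvIota_mem] at ha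
            simp only [Bool.not_eq_true, decide_eq_false_iff_not]
            omega
          rw [show run = n :: pvIota (n + 1) t.length from rfl, List.filter_cons]
          simp [hnil]
        have h2 : List.filter (fun i => !(run ++ tail).contains (i - 1)) tail = pvStarts tail := by
          unfold pvStarts
          apply List.filter_congr
          intro x hx
          have hxlb := htailmem x hx
          simp only [hmemiff]
          have : run.contains (x - 1) = false := by
            rw [Bool.eq_false_iff, Ne, hrunc]; omega
          rw [this, Bool.false_or]
        rw [h1, h2, List.singleton_append]
        rfl
      -- ends of the whole list
      have hends : pvEnds (pvDP n (c :: rest)) = (n + t.length) :: pvEnds tail := by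
        unfold pvEnds
        rw [hdp, List.filter_append]
        have h1 : List.filter (fun i => !(run ++ tail).contains (i + 1)) run
            = [n + t.length] := by
          have hp : ∀ x ∈ run, (!(run ++ tail).contains (x + 1)) = decide (x = n + t.length) := by
            intro x hx
            obtain ⟨hx1, hx2⟩ := (hrunmem x).1 hx
            by_cases hxe : x = n + t.length
            · simp only [hxe, decide_true, Bool.not_eq_true', List.contains_eq_mem,
                List.mem_append, decide_eq_false_iff_not]
              rintro (hc | hc)
              · have := (hrunmem _).1 hc; omega
              · have := htailmem _ hc; omega
            · have hin : (run ++ tail).contains (x + 1) = true := by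
                simp only [hmemiff, Bool.or_eq_true]
                left; rw [hrunc]; omega
              rw [hin]; simp [hxe]
          rw [List.filter_congr hp]
          have hnil : List.filter (fun x => decide (x = n + (t.length : Int)))
              (pvIota n t.length) = [] := by
            apply List.filter_eq_nil_iff.2
            intro a ha
            rw [pvIota_mem] at ha
            simp only [Bool.not_eq_true, decide_eq_false_iff_not]
            omega
          rw [hrundef, pvIota_snoc, List.filter_append, hnil]
          simp
        have h2 : List.filter (fun i => !(run ++ tail).contains (i + 1)) tail = pvEnds tail := by
          unfold pvEnds
          apply List.filter_congr
          intro x hx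
          have hxlb := htailmem x hx
          simp only [hmemiff]
          have : run.contains (x + 1) = false := by
            rw [Bool.eq_false_iff, Ne, hrunc]; omega
          rw [this, Bool.false_or]
        rw [h1, h2, List.singleton_append]
        rfl
      rw [hstarts, hends, List.zip_cons_cons]
      have hrl : r.length ≤ rest.length := by
        rw [hr]; exact List.length_dropWhile_le _ _
      have hlt : r.length < len := by
        subst hL; simp only [List.length_cons]; omega
      rw [ih r.length hlt r (n + 1 + t.length) rfl]
      simp only [pvRuns, h, if_true, ← ht, ← hr]
    · -- non-digit head: same digit positions shifted view
      rw [show pvRuns n (c :: rest) = pvRuns (n + 1) rest by simp [pvRuns, h]]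
      have hdp : pvDP n (c :: rest) = pvDP (n + 1) rest := by
        rw [pvDP_cons]; simp [h]
      rw [hdp]
      exact ih rest.length (by subst hL; simp) rest (n + 1) rfl

-- bridging the port's Set.contains-over-ofList to plain list membership
theorem pvAlt_eq (line : String) :
    find_numbers_in_the_line_alt line =
      (pvStarts (pvDP 0 line.toList)).zip (pvEnds (pvDP 0 line.toList)) := by
  unfold find_numbers_in_the_line_alt pvStarts pvEnds pvDP
  dsimp only
  congr 1 <;>
  · apply List.filter_congr
    intro x _
    simp [pysem]

-- ===== VERDICT (by name: the statement is the Claim_ definition above) =====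
theorem find_numbers_in_the_line_spec : Claim_equal_find_numbers_in_the_line := by
  intro line _
  unfold Spec_find_numbers_in_the_line find_numbers_in_the_line
  rw [pvAOuter_eq, pvAlt_eq, pvZip_eq_runs]
  simp
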